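-- pv_equiv track=rewrite | github.com/GeekSky98/Algorithm_lab | Programmers/PCCP/외톨이 알파벳/explanation.py | solution
-- ===== SOURCE A (Python) =====
-- def solution(input_string):
--     visit = set()
--     answer = set()
--     prev = None
--     for i in (input_string):
--         if i in visit:
--             if i != prev:
--                 answer.add(i)
--         else:
--             visit.add(i)
--         prev = i
--
--     return "".join(sorted(list(answer))) if answer else "N"
-- ===== SOURCE B (Python) =====
-- def solution(input_string):
--     # collapse into maximal runs: one "head" character per run
--     if input_string:
--         heads = [input_string[0]] + [b for a, b in zip(input_string, input_string[1:]) if a != b]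
--     else:
--         heads = []
--     counts = {}
--     for c in heads:
--         counts[c] = counts.get(c, 0) + 1
--     lonely = sorted(c for c, n in counts.items() if n >= 2)
--     return "".join(lonely) if lonely else "N"
-- ===== Notes on version B (the rewrite author's own statement) =====
-- stated objective: alternative
-- what changed: B collapses the string into maximal consecutive runs (one head character per run), counts runs per letter in a dict, and returns the sorted letters with at least two runs, instead of A's online scan that maintains visit/answer sets and the previous character.
import Mathlib
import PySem

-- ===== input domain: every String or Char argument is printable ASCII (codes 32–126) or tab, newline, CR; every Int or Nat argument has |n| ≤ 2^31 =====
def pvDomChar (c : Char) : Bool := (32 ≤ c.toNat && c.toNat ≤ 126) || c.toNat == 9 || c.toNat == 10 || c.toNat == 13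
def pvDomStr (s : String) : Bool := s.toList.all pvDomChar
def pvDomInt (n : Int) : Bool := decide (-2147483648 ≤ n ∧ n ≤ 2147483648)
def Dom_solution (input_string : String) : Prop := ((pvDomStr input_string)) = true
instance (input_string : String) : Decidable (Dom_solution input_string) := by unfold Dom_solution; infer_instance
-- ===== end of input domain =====

-- B collapses the string into run-heads and counts runs per letter (threshold ≥ 2), instead of A's
-- online visit/answer two-set scan; objective: alternative decomposition, same cost.

-- ===== PORT A =====
def solution (input_string : String) : String :=
  let st := input_string.toList.foldl
    (fun (st : PySem.Set Char × PySem.Set Char × Option Char) i =>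
      let visit := st.1
      let answer := st.2.1
      let prev := st.2.2
      if PySem.Set.contains visit i then
        if some i ≠ prev then (visit, PySem.Set.add answer i, some i)
        else (visit, answer, some i)
      else (PySem.Set.add visit i, answer, some i))
    (PySem.Set.empty, PySem.Set.empty, none)
  let answer := st.2.1
  if answer ≠ [] then
    PySem.Str.join "" ((PySem.List.sorted answer (fun x => x) false).map (fun c => String.ofList [c]))
  else "N"

-- ===== PORT B =====
def solution_alt (input_string : String) : String :=
  let s := input_string.toList
  -- heads = [s[0]] + [b for a, b in zip(s, s[1:]) if a != b]  (or [] for empty s)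
  let heads : List Char :=
    match s with
    | [] => []
    | c :: cs => c :: (List.zip (c :: cs) cs).filterMap
        (fun p => if p.1 ≠ p.2 then some p.2 else none)
  let counts : PySem.Dict Char Int :=
    heads.foldl (fun d c => PySem.Dict.insert d c (PySem.Dict.getD d c 0 + 1)) PySem.Dict.empty
  let lonely := PySem.List.sorted
    ((PySem.Dict.items counts).filterMap (fun p => if 2 ≤ p.2 then some p.1 else none))
    (fun x => x) false
  if lonely ≠ [] then
    PySem.Str.join "" (lonely.map (fun c => String.ofList [c]))
  else "N"

-- ===== PRECONDITION & SPEC =====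
def Spec_solution (input_string : String) (out : String) : Prop := out = solution_alt input_string
instance (input_string : String) (out : String) : Decidable (Spec_solution input_string out) := by unfold Spec_solution; infer_instance

-- ===== CLAIM (what is proved, stated in full; the proofs are below) =====
def Claim_equal_solution : Prop := ∀ (input_string : String), Dom_solution input_string → Spec_solution input_string (solution input_string)

-- ===== LEMMAS AND PROOFS =====

-- the run heads of a list, given the character that precedes it
def headsOf (prev : Option Char) : List Char → List Char
  | [] => []
  | c :: cs => if some c = prev then headsOf (some c) cs else c :: headsOf (some c) cs

theorem headsOf_zip (p : Char) (cs : List Char) :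
    ((p :: cs).zip cs).filterMap (fun q => if q.1 ≠ q.2 then some q.2 else none)
      = headsOf (some p) cs := by
  induction cs generalizing p with
  | nil => rfl
  | cons b t ih =>
    simp only [List.zip_cons_cons, List.filterMap_cons, headsOf, ih b]
    by_cases h : p = b
    · subst h; simp
    · have h' : ¬ b = p := fun hh => h hh.symm
      simp [h, h']

-- A's loop step
def stepA (st : PySem.Set Char × PySem.Set Char × Option Char) (i : Char) :
    PySem.Set Char × PySem.Set Char × Option Char :=
  let visit := st.1
  let answer := st.2.1
  let prev := st.2.2
  if PySem.Set.contains visit i then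
    if some i ≠ prev then (visit, PySem.Set.add answer i, some i)
    else (visit, answer, some i)
  else (PySem.Set.add visit i, answer, some i)

-- A's loop invariant, the run-count accumulated so far abstracted as m
theorem loopA_inv (l : List Char) (visit answer : PySem.Set Char) (prev : Option Char)
    (m : Char → Nat)
    (hv : ∀ c, c ∈ visit ↔ 1 ≤ m c)
    (ha : ∀ c, c ∈ answer ↔ 2 ≤ m c)
    (hn : answer.Nodup)
    (hp : ∀ c, prev = some c → 1 ≤ m c) :
    (∀ c, c ∈ (l.foldl stepA (visit, answer, prev)).2.1 ↔ 2 ≤ m c + (headsOf prev l).count c)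
    ∧ (l.foldl stepA (visit, answer, prev)).2.1.Nodup := by
  induction l generalizing visit answer prev m with
  | nil =>
    refine ⟨fun c => ?_, hn⟩
    simpa [headsOf] using ha c
  | cons i t ih =>
    rw [List.foldl_cons]
    by_cases hvis : i ∈ visit
    · have h1 : 1 ≤ m i := (hv i).1 hvis
      by_cases hpr : some i = prev
      · -- run continues: heads unchanged, answer unchanged
        have key := ih visit answer (some i) m hv ha hn
          (by intro c hc; cases hc; exact h1)
        have hst : stepA (visit, answer, prev) i = (visit, answer, some i) := by
          simp only [stepA, (PySem.Set.contains_iff visit i).2 hvis, if_true]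
          rw [if_neg (not_not_intro hpr)]
        rw [hst]
        refine ⟨fun c => ?_, key.2⟩
        rw [key.1 c]
        simp [headsOf, hpr]
      · -- a fresh run of an already-seen char: add to answer
        have key := ih visit (PySem.Set.add answer i) (some i)
          (fun c => if c = i then m c + 1 else m c)
          (by intro c
              by_cases hci : c = i
              · subst hci
                beta_reduce
                rw [if_pos rfl]
                exact ⟨fun _ => Nat.le_add_left 1 (m c), fun _ => hvis⟩
              · beta_reduce
                rw [if_neg hci]; exact hv c)
          (by intro c
              by_cases hci : c = i
              · subst hci
                beta_reduce
                rw [if_pos rfl]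
                constructor
                · intro _; omega
                · intro _; simp [PySem.Set.mem_add]
              · beta_reduce
                rw [if_neg hci]
                simp [PySem.Set.mem_add, hci, ha c])
          (PySem.Set.nodup_add _ _ hn)
          (by intro c hc; cases hc; beta_reduce; rw [if_pos rfl]; omega)
        have hst : stepA (visit, answer, prev) i = (visit, PySem.Set.add answer i, some i) := by
          simp only [stepA, (PySem.Set.contains_iff visit i).2 hvis, if_true, if_pos hpr]
        rw [hst]
        refine ⟨fun c => ?_, key.2⟩
        rw [key.1 c]
        have hh : headsOf prev (i :: t) = i :: headsOf (some i) t := by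
          simp [headsOf, hpr]
        rw [hh]
        by_cases hci : c = i
        · subst hci; simp; omega
        · beta_reduce
          rw [if_neg hci, List.count_cons_of_ne (fun hh : i = c => hci hh.symm)]
    · -- first occurrence of i at all
      have hm0 : ¬ 1 ≤ m i := fun h => hvis ((hv i).2 h)
      have hpr : some i ≠ prev := by
        intro h
        exact hm0 (hp i h.symm)
      have key := ih (PySem.Set.add visit i) answer (some i)
        (fun c => if c = i then 1 else m c)
        (by intro c
            by_cases hci : c = i
            · subst hci; beta_reduce; rw [if_pos rfl]; simp [PySem.Set.mem_add]
            · beta_reduce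
              rw [if_neg hci]; simp [PySem.Set.mem_add, hci, hv c])
        (by intro c
            by_cases hci : c = i
            · subst hci
              beta_reduce
              rw [if_pos rfl, ha c]
              omega
            · beta_reduce
              rw [if_neg hci]; exact ha c)
        hn
        (by intro c hc; cases hc; beta_reduce; rw [if_pos rfl])
      have hst : stepA (visit, answer, prev) i = (PySem.Set.add visit i, answer, some i) := by
        have hfal : PySem.Set.contains visit i = false := by
          rw [Bool.eq_false_iff]
          intro hcon
          exact hvis ((PySem.Set.contains_iff visit i).1 hcon)
        simp only [stepA, hfal, Bool.false_eq_true, if_false]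
      rw [hst]
      refine ⟨fun c => ?_, key.2⟩
      rw [key.1 c]
      have hh : headsOf prev (i :: t) = i :: headsOf (some i) t := by
        simp [headsOf, hpr]
      rw [hh]
      by_cases hci : c = i
      · subst hci; simp; omega
      · beta_reduce
        rw [if_neg hci, List.count_cons_of_ne (fun hh : i = c => hci hh.symm)]

theorem filterMap_if_eq_filter {α : Type} (P : α → Prop) [DecidablePred P] (l : List α) :
    l.filterMap (fun a => if P a then some a else none) = l.filter (fun a => decide (P a)) := by
  induction l with
  | nil => rfl
  | cons x t ih =>
    by_cases h : P x <;> simp [h, ih]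

-- B's run-head comprehension, as a named helper for the statements below
def headsB (s : List Char) : List Char :=
  match s with
  | [] => []
  | c :: cs => c :: (List.zip (c :: cs) cs).filterMap
      (fun p => if p.1 ≠ p.2 then some p.2 else none)

-- B's pre-sort list is the filter of the distinct run heads by run-count ≥ 2
theorem lonelyB_eq (heads : List Char) :
    (PySem.Dict.items
        ((heads.foldl (fun d c => PySem.Dict.insert d c (PySem.Dict.getD d c 0 + 1))
          PySem.Dict.empty) : PySem.Dict Char Int)).filterMap (fun p => if 2 ≤ p.2 then some p.1 else none)
      = (PySem.Set.ofList heads).filter (fun c => decide (2 ≤ (heads.count c : Int))) := by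
  have h0 : ((heads.foldl (fun d c => PySem.Dict.insert d c (PySem.Dict.getD d c 0 + 1))
          PySem.Dict.empty) : PySem.Dict Char Int) = PySem.Dict.counter heads := rfl
  rw [h0, PySem.Dict.items_counter, List.filterMap_map]
  rw [← filterMap_if_eq_filter (fun c => 2 ≤ (heads.count c : Int))]
  rfl

-- the two ports agree, stated on the underlying character list
theorem lists_eq (s : List Char) :
    (if ((s.foldl stepA (PySem.Set.empty, PySem.Set.empty, none)).2.1 : List Char) ≠ [] then
      PySem.Str.join "" ((PySem.List.sorted
        (s.foldl stepA (PySem.Set.empty, PySem.Set.empty, none)).2.1 (fun x => x) false).map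
          (fun c => String.ofList [c]))
    else "N")
    =
    (if (PySem.List.sorted
          ((PySem.Dict.items
            (((headsB s).foldl
              (fun d c => PySem.Dict.insert d c (PySem.Dict.getD d c 0 + 1))
              PySem.Dict.empty) : PySem.Dict Char Int)).filterMap
            (fun p => if 2 ≤ p.2 then some p.1 else none)) (fun x => x) false) ≠ [] then
      PySem.Str.join "" ((PySem.List.sorted
          ((PySem.Dict.items
            (((headsB s).foldl
              (fun d c => PySem.Dict.insert d c (PySem.Dict.getD d c 0 + 1))
              PySem.Dict.empty) : PySem.Dict Char Int)).filterMap
            (fun p => if 2 ≤ p.2 then some p.1 else none)) (fun x => x) false).map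
          (fun c => String.ofList [c]))
    else "N") := by
  have hheads : headsB s = headsOf none s := by
    cases s with
    | nil => rfl
    | cons c cs =>
      show c :: ((c :: cs).zip cs).filterMap (fun p => if p.1 ≠ p.2 then some p.2 else none)
          = headsOf none (c :: cs)
      rw [headsOf_zip c cs]
      simp [headsOf]
  rw [hheads, lonelyB_eq (headsOf none s)]
  have hA := loopA_inv s PySem.Set.empty PySem.Set.empty none (fun _ => 0)
    (by intro c; simp [PySem.Set.empty]) (by intro c; simp [PySem.Set.empty])
    (by simp [PySem.Set.empty]) (by intro c h; cases h)
  set A := (s.foldl stepA (PySem.Set.empty, PySem.Set.empty, none)).2.1 with hAdef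
  set L := (PySem.Set.ofList (headsOf none s)).filter
    (fun c => decide (2 ≤ ((headsOf none s).count c : Int))) with hLdef
  have hmem : ∀ c, c ∈ A ↔ c ∈ L := by
    intro c
    rw [(hA.1 c)]
    beta_reduce
    constructor
    · intro h
      have hcnt : 2 ≤ (headsOf none s).count c := by omega
      have hmem' : c ∈ headsOf none s := List.count_pos_iff.mp (by omega)
      simp only [hLdef, List.mem_filter, PySem.Set.mem_ofList, decide_eq_true_eq]
      exact ⟨hmem', by exact_mod_cast hcnt⟩
    · intro h
      simp only [hLdef, List.mem_filter, PySem.Set.mem_ofList, decide_eq_true_eq] at h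
      have : 2 ≤ (headsOf none s).count c := by exact_mod_cast h.2
      omega
  have hnodupL : L.Nodup := List.Nodup.filter _ (PySem.Set.nodup_ofList _)
  have hperm : A.Perm L := (List.perm_ext_iff_of_nodup hA.2 hnodupL).2 hmem
  have hsorted : PySem.List.sorted A (fun x => x) false = PySem.List.sorted L (fun x => x) false :=
    PySem.List.sorted_eq_sorted_of_perm A L (fun x => x) (fun _ _ h => h) hperm
  have hempty : (A = []) ↔ (PySem.List.sorted L (fun x => x) false = []) := by
    rw [PySem.List.sorted_eq_nil_iff]
    constructor
    · intro h
      exact List.eq_nil_iff_forall_not_mem.2 (fun c hc => by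
        rw [← hmem c] at hc; simp [h] at hc)
    · intro h
      exact List.eq_nil_iff_forall_not_mem.2 (fun c hc => by
        rw [hmem c] at hc; simp [h] at hc)
  by_cases hA0 : A ≠ []
  · rw [if_pos hA0, if_pos (fun h => hA0 (hempty.2 h)), hsorted]
  · rw [if_neg hA0, if_neg (not_not_intro (hempty.1 (not_not.mp hA0)))]

-- ===== VERDICT (by name: the statement is the Claim_ definition above) =====
theorem solution_spec : Claim_equal_solution := by
  intro input_string _
  show solution input_string = solution_alt input_string
  exact lists_eq input_string.toList
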